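-- pv_equiv track=rewrite | github.com/SwethaGuru-snsihub/AgenticAI_Workshop | DAY 9/DAY 9 - OFFER PERSONALIZER/simple_agents.py | _assess_company_tier
-- ===== SOURCE A (Python) =====
-- def _assess_company_tier(company: str) -> str:
--     """Enhanced company tier assessment"""
--     if not company:
--         return "Unknown - Standard positioning"
--
--     company_lower = company.lower()
--
--     tier1_keywords = ['google', 'microsoft', 'amazon', 'meta', 'apple', 'netflix', 'uber', 'linkedin']
--     tier2_keywords = ['flipkart', 'paytm', 'ola', 'swiggy', 'zomato', 'razorpay', 'cred', 'phonepe']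
--     unicorn_keywords = ['byju', 'unacademy', 'vedantu', 'meesho', 'sharechat']
--     service_keywords = ['tcs', 'infosys', 'wipro', 'cognizant', 'accenture', 'capgemini', 'hcl']
--
--     if any(keyword in company_lower for keyword in tier1_keywords):
--         return "Tier1 (FAANG) - Premium positioning with 40-60% market premium"
--     elif any(keyword in company_lower for keyword in tier2_keywords):
--         return "Tier2 (Established Unicorn) - Strong positioning with 20-30% premium"
--     elif any(keyword in company_lower for keyword in unicorn_keywords):
--         return "Tier2 (Growing Unicorn) - Good positioning with 15-25% premium"
--     elif any(keyword in company_lower for keyword in service_keywords):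
--         return "Service Company - Standard positioning with market-rate compensation"
--     else:
--         return "Startup/Other - Moderate positioning with equity upside potential"
-- ===== SOURCE B (Python) =====
-- def _assess_company_tier(company: str) -> str:
--     """Single min-rank pass over a flat keyword->tier-rank table."""
--     if not company:
--         return "Unknown - Standard positioning"
--     cl = company.lower()
--     groups = [
--         ['google', 'microsoft', 'amazon', 'meta', 'apple', 'netflix', 'uber', 'linkedin'],
--         ['flipkart', 'paytm', 'ola', 'swiggy', 'zomato', 'razorpay', 'cred', 'phonepe'],
--         ['byju', 'unacademy', 'vedantu', 'meesho', 'sharechat'],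
--         ['tcs', 'infosys', 'wipro', 'cognizant', 'accenture', 'capgemini', 'hcl'],
--     ]
--     rank_of = {kw: r for r, kws in enumerate(groups) for kw in kws}
--     messages = [
--         "Tier1 (FAANG) - Premium positioning with 40-60% market premium",
--         "Tier2 (Established Unicorn) - Strong positioning with 20-30% premium",
--         "Tier2 (Growing Unicorn) - Good positioning with 15-25% premium",
--         "Service Company - Standard positioning with market-rate compensation",
--     ]
--     best = 4
--     for kw, r in rank_of.items():
--         if kw in cl and r < best:
--             best = r
--     return messages[best] if best < 4 else "Startup/Other - Moderate positioning with equity upside potential"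
-- ===== Notes on version B (the rewrite author's own statement) =====
-- stated objective: alternative
-- what changed: Replaces A's four ordered short-circuiting any() scans over separate keyword lists by one pass over a flat keyword->rank dict that tracks the minimum matching tier rank, then indexes a rank->message table.
import Mathlib
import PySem

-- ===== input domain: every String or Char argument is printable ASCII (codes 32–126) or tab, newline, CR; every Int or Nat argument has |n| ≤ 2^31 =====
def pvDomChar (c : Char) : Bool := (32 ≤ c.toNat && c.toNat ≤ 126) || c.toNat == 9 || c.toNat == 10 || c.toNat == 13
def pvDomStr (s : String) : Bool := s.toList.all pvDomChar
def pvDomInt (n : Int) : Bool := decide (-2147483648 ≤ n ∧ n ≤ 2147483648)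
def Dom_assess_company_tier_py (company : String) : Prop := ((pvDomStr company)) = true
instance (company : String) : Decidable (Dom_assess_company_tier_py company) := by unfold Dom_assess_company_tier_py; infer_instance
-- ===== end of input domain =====

-- B replaces A's four ordered short-circuiting any() scans by one min-rank pass over a flat keyword->rank table (alternative decomposition, same cost).


-- ===== PORT A =====
def assess_company_tier_py (company : String) : String :=
  if company = "" then "Unknown - Standard positioning"
  else
    let company_lower := PySem.Str.lower company
    let tier1_keywords : List String := ["google", "microsoft", "amazon", "meta", "apple", "netflix", "uber", "linkedin"]
    let tier2_keywords : List String := ["flipkart", "paytm", "ola", "swiggy", "zomato", "razorpay", "cred", "phonepe"]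
    let unicorn_keywords : List String := ["byju", "unacademy", "vedantu", "meesho", "sharechat"]
    let service_keywords : List String := ["tcs", "infosys", "wipro", "cognizant", "accenture", "capgemini", "hcl"]
    if tier1_keywords.any (fun keyword => PySem.Str.isIn keyword company_lower) then
      "Tier1 (FAANG) - Premium positioning with 40-60% market premium"
    else if tier2_keywords.any (fun keyword => PySem.Str.isIn keyword company_lower) then
      "Tier2 (Established Unicorn) - Strong positioning with 20-30% premium"
    else if unicorn_keywords.any (fun keyword => PySem.Str.isIn keyword company_lower) then
      "Tier2 (Growing Unicorn) - Good positioning with 15-25% premium"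
    else if service_keywords.any (fun keyword => PySem.Str.isIn keyword company_lower) then
      "Service Company - Standard positioning with market-rate compensation"
    else
      "Startup/Other - Moderate positioning with equity upside potential"

-- ===== PORT B =====
-- the four keyword groups, in rank order 0..3
def pvGroups : List (List String) :=
  [["google", "microsoft", "amazon", "meta", "apple", "netflix", "uber", "linkedin"],
   ["flipkart", "paytm", "ola", "swiggy", "zomato", "razorpay", "cred", "phonepe"],
   ["byju", "unacademy", "vedantu", "meesho", "sharechat"],
   ["tcs", "infosys", "wipro", "cognizant", "accenture", "capgemini", "hcl"]]

-- rank_of = {kw: r for r, kws in enumerate(groups) for kw in kws} (flattened in insertion order; keys are distinct)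
def pvRankOf : List (String × Int) :=
  (PySem.List.enumerate pvGroups 0).flatMap (fun rk => rk.2.map (fun kw => (kw, rk.1)))

def pvMessages : List String :=
  ["Tier1 (FAANG) - Premium positioning with 40-60% market premium",
   "Tier2 (Established Unicorn) - Strong positioning with 20-30% premium",
   "Tier2 (Growing Unicorn) - Good positioning with 15-25% premium",
   "Service Company - Standard positioning with market-rate compensation"]

def assess_company_tier_py_alt (company : String) : String :=
  if company = "" then "Unknown - Standard positioning"
  else
    let cl := PySem.Str.lower company
    let best := pvRankOf.foldl
      (fun best kr => if PySem.Str.isIn kr.1 cl ∧ kr.2 < best then kr.2 else best) (4 : Int)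
    if best < 4 then PySem.List.pyGetD pvMessages best ""
    else "Startup/Other - Moderate positioning with equity upside potential"

-- ===== PRECONDITION & SPEC =====
def Spec_assess_company_tier_py (company : String) (out : String) : Prop := out = assess_company_tier_py_alt company
instance (company : String) (out : String) : Decidable (Spec_assess_company_tier_py company out) := by unfold Spec_assess_company_tier_py; infer_instance

-- ===== CLAIM (what is proved, stated in full; the proofs are below) =====
def Claim_equal_assess_company_tier_py : Prop := ∀ (company : String), Dom_assess_company_tier_py company → Spec_assess_company_tier_py company (assess_company_tier_py company)

-- ===== LEMMAS AND PROOFS =====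

-- B's min-rank fold over one rank-r group: it lowers `best` to r exactly when some keyword of the group matches and r < best.
theorem pvFoldGroup (cl : String) (r : Int) (l : List String) (best : Int) :
    (l.map (fun kw => (kw, r))).foldl
      (fun best kr => if PySem.Str.isIn kr.1 cl ∧ kr.2 < best then kr.2 else best) best
    = if l.any (fun kw => PySem.Str.isIn kw cl) ∧ r < best then r else best := by
  induction l generalizing best with
  | nil => simp
  | cons h t ih =>
    simp only [List.map_cons, List.foldl_cons, List.any_cons, ih]
    by_cases hh : PySem.Str.isIn h cl = true <;> by_cases hr : r < best <;>
      simp only [hh, hr] <;> split_ifs <;>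
        try (first | rfl | omega | simp_all)
    all_goals
      exfalso
      obtain ⟨x, hx, hxt⟩ := ‹∃ x ∈ t, PySem.Chars.isIn x.toList cl.toList = true›
      have := ‹∀ x ∈ t, PySem.Chars.isIn x.toList cl.toList = false› x hx
      simp_all

theorem assess_company_tier_py_eq (company : String) :
    assess_company_tier_py company = assess_company_tier_py_alt company := by
  unfold assess_company_tier_py assess_company_tier_py_alt
  by_cases h0 : company = ""
  · simp [h0]
  · simp only [if_neg h0]
    have hflat : pvRankOf =
        (["google", "microsoft", "amazon", "meta", "apple", "netflix", "uber", "linkedin"].map (fun kw => (kw, (0 : Int))))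
        ++ (["flipkart", "paytm", "ola", "swiggy", "zomato", "razorpay", "cred", "phonepe"].map (fun kw => (kw, (1 : Int))))
        ++ (["byju", "unacademy", "vedantu", "meesho", "sharechat"].map (fun kw => (kw, (2 : Int))))
        ++ (["tcs", "infosys", "wipro", "cognizant", "accenture", "capgemini", "hcl"].map (fun kw => (kw, (3 : Int)))) := by
      rfl
    rw [hflat]
    simp only [List.foldl_append, pvFoldGroup]
    generalize (["google", "microsoft", "amazon", "meta", "apple", "netflix", "uber", "linkedin"].any
      (fun kw => PySem.Str.isIn kw (PySem.Str.lower company))) = b1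
    generalize (["flipkart", "paytm", "ola", "swiggy", "zomato", "razorpay", "cred", "phonepe"].any
      (fun kw => PySem.Str.isIn kw (PySem.Str.lower company))) = b2
    generalize (["byju", "unacademy", "vedantu", "meesho", "sharechat"].any
      (fun kw => PySem.Str.isIn kw (PySem.Str.lower company))) = b3
    generalize (["tcs", "infosys", "wipro", "cognizant", "accenture", "capgemini", "hcl"].any
      (fun kw => PySem.Str.isIn kw (PySem.Str.lower company))) = b4
    revert b1 b2 b3 b4
    decide

-- ===== VERDICT (by name: the statement is the Claim_ definition above) =====
theorem assess_company_tier_py_spec : Claim_equal_assess_company_tier_py := by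
  intro company _
  exact assess_company_tier_py_eq company
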